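-- pv_equiv track=rewrite | github.com/pypi-data/pypi-mirror-398 | packages/lumen-resources/lumen_resources-0.4.0-py3-none-any.whl/lumen_resources/downloader.py | _should_fallback_download
-- ===== SOURCE A (Python) =====
-- def _should_fallback_download(error_message: str) -> bool:
--     """Determine if a download error should trigger fallback to another precision.
--
--     Args:
--         error_message: The error message from the download attempt.
--
--     Returns:
--         True if the error suggests we should try the other precision, False otherwise.
--     """
--     # Common patterns that indicate file matching issues
--     fallback_indicators = [
--         "No matching files found",
--         "No files matched the pattern",
--         "Cannot find any files matching",
--         "File pattern matched no files",
--         "No such file or directory",  # Sometimes used for remote files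
--     ]
--
--     error_lower = error_message.lower()
--     return any(
--         indicator.lower() in error_lower for indicator in fallback_indicators
--     )
-- ===== SOURCE B (Python) =====
-- import re
--
-- _FALLBACK_PATTERN = re.compile(
--     "|".join(
--         re.escape(indicator)
--         for indicator in (
--             "No matching files found",
--             "No files matched the pattern",
--             "Cannot find any files matching",
--             "File pattern matched no files",
--             "No such file or directory",
--         )
--     ),
--     re.IGNORECASE,
-- )
--
--
-- def _should_fallback_download(error_message: str) -> bool:
--     return _FALLBACK_PATTERN.search(error_message) is not None
-- ===== Notes on version B (the rewrite author's own statement) =====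
-- stated objective: idiomatic
-- what changed: Replaces five independent lowered-substring membership scans with one precompiled case-insensitive regex alternating the escaped indicator literals, searched once over the message.
import Mathlib
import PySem

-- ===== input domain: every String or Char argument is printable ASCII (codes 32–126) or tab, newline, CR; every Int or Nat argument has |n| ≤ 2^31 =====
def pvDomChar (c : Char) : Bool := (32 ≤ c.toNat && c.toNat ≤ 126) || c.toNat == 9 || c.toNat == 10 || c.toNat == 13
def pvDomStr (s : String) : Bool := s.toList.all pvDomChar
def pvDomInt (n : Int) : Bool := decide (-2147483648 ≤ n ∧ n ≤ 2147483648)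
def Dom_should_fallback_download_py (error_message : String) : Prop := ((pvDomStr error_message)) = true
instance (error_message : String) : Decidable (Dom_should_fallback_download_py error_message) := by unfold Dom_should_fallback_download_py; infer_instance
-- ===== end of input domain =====

-- B replaces A's five independent 'substring in lowered message' scans with one
-- precompiled case-insensitive regex alternating the five escaped literals, searched
-- once (objective: idiomatic; same result, no speed claim).

-- ===== PORT A =====
def should_fallback_download_py (error_message : String) : Bool :=
  let fallback_indicators : List String :=
    [ "No matching files found",
      "No files matched the pattern",
      "Cannot find any files matching",
      "File pattern matched no files",
      "No such file or directory" ]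
  let error_lower := PySem.Str.lower error_message
  fallback_indicators.any (fun indicator =>
    PySem.Str.isIn (PySem.Str.lower indicator) error_lower)

-- ===== PORT B =====
-- Source B's compiled regex is an alternation of the five escaped indicator literals with
-- re.IGNORECASE. PySem has no regex engine, so re.search of that pattern is ported by
-- hand, exactly as the engine matches it on the ASCII domain: case-fold both sides
-- (IGNORECASE), then scan start positions left to right, at each trying the
-- alternatives in the pattern's order as prefixes; search succeeds iff some position
-- matches some alternative.
def pvAlternatives : List (List Char) :=
  [ "No matching files found".toList,
    "No files matched the pattern".toList,
    "Cannot find any files matching".toList,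
    "File pattern matched no files".toList,
    "No such file or directory".toList ]

def should_fallback_download_py_alt (error_message : String) : Bool :=
  let folded := PySem.Chars.lower error_message.toList
  (List.range (folded.length + 1)).any (fun i =>
    pvAlternatives.any (fun p => (PySem.Chars.lower p).isPrefixOf (folded.drop i)))

-- ===== PRECONDITION & SPEC =====
def Spec_should_fallback_download_py (error_message : String) (out : Bool) : Prop := out = should_fallback_download_py_alt error_message
instance (error_message : String) (out : Bool) : Decidable (Spec_should_fallback_download_py error_message out) := by unfold Spec_should_fallback_download_py; infer_instance

-- ===== CLAIM (what is proved, stated in full; the proofs are below) =====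
def Claim_equal_should_fallback_download_py : Prop := ∀ (error_message : String), Dom_should_fallback_download_py error_message → Spec_should_fallback_download_py error_message (should_fallback_download_py error_message)

-- ===== LEMMAS AND PROOFS =====

-- swap the two nested `any`s of B's port
theorem pv_any_swap {α β : Type} (l : List α) (ps : List β) (f : β → α → Bool) :
    (l.any fun a => ps.any fun p => f p a) = ps.any (fun p => l.any (f p)) := by
  rw [Bool.eq_iff_iff]
  simp only [List.any_eq_true]
  tauto

-- B's position scan for one nonempty pattern is exactly Python's 'p in s'
theorem pv_scan_eq_isIn (p s : List Char) (hp : p ≠ []) :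
    ((List.range (s.length + 1)).any fun i => p.isPrefixOf (s.drop i))
      = PySem.Chars.isIn p s := by
  rcases Bool.eq_false_or_eq_true (PySem.Chars.isIn p s) with h | h <;> rw [h]
  case inl =>
    rw [List.any_eq_true]
    obtain ⟨j, hj⟩ := (PySem.Chars.exists_prefix_drop_iff_isIn p s).mpr h
    have hjle : j ≤ s.length := by
      by_contra hgt
      rw [List.drop_eq_nil_of_le (by omega)] at hj
      exact hp (List.prefix_nil.mp hj)
    exact ⟨j, List.mem_range.mpr (by omega), List.isPrefixOf_iff_prefix.mpr hj⟩
  case inr =>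
    rw [List.any_eq_false]
    intro i hi hpre
    rw [PySem.Chars.isIn_eq_false_iff] at h
    exact h ((List.isPrefixOf_iff_prefix.mp hpre).isInfix.trans
      (List.drop_suffix i s).isInfix)

-- ===== VERDICT (by name: the statement is the Claim_ definition above) =====
theorem should_fallback_download_py_spec : Claim_equal_should_fallback_download_py := by
  intro em _
  unfold Spec_should_fallback_download_py should_fallback_download_py should_fallback_download_py_alt
  rw [pv_any_swap]
  simp only [pvAlternatives, List.any_cons, List.any_nil,
    PySem.Str.isIn_eq, PySem.Str.toList_lower,
    pv_scan_eq_isIn (PySem.Chars.lower "No matching files found".toList) _ (by decide),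
    pv_scan_eq_isIn (PySem.Chars.lower "No files matched the pattern".toList) _ (by decide),
    pv_scan_eq_isIn (PySem.Chars.lower "Cannot find any files matching".toList) _ (by decide),
    pv_scan_eq_isIn (PySem.Chars.lower "File pattern matched no files".toList) _ (by decide),
    pv_scan_eq_isIn (PySem.Chars.lower "No such file or directory".toList) _ (by decide)]
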